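-- pv_equiv track=rewrite | github.com/helpfuldolphin/mathledger | backend/crypto/slice_hash_ledger.py | _classify_drift_severity
-- ===== SOURCE A (Python) =====
-- from enum import Enum
-- from typing import Any, Dict, List, Optional, Tuple
--
-- class SliceHashDriftError(Enum):
--     """
--     SHD-* Error Codes: Slice Hash Drift (ledger-level).
--
--     These errors indicate the ledger itself has drifted due to
--     normalization changes, encoding changes, or domain tag changes.
--     """
--     SHD_001_LEDGER_FORMULA_DRIFT = "SHD-001"
--     SHD_002_LEDGER_POOL_DRIFT = "SHD-002"
--     SHD_003_LEDGER_ENTRY_MISSING = "SHD-003"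
--     SHD_004_NORMALIZATION_CHANGE = "SHD-004"
--
-- class ManifestHashMismatchError(Enum):
--     """
--     MHM-* Error Codes: Manifest Hash Mismatch (binding-level).
--
--     These errors indicate the manifest disagrees with preregistration or ledger.
--     """
--     MHM_001_CONFIG_HASH_MISMATCH = "MHM-001"
--     MHM_002_POOL_HASH_MISMATCH = "MHM-002"
--     MHM_003_LEDGER_ID_MISMATCH = "MHM-003"
--     MHM_004_FROZEN_AT_VIOLATION = "MHM-004"
--
-- def _classify_drift_severity(drift_codes: List[str]) -> str:
--     """
--     Classify drift severity based on error codes.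
--
--     - blocking: Config hash or pool hash mismatch (affects experiment validity)
--     - warning: Ledger ID mismatch (affects traceability)
--     - info: Minor metadata changes
--     """
--     blocking_codes = {
--         ManifestHashMismatchError.MHM_001_CONFIG_HASH_MISMATCH.value,
--         ManifestHashMismatchError.MHM_002_POOL_HASH_MISMATCH.value,
--         SliceHashDriftError.SHD_001_LEDGER_FORMULA_DRIFT.value,
--         SliceHashDriftError.SHD_002_LEDGER_POOL_DRIFT.value,
--     }
--
--     warning_codes = {
--         ManifestHashMismatchError.MHM_003_LEDGER_ID_MISMATCH.value,
--         SliceHashDriftError.SHD_003_LEDGER_ENTRY_MISSING.value,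
--     }
--
--     for code in drift_codes:
--         if code in blocking_codes:
--             return "blocking"
--
--     for code in drift_codes:
--         if code in warning_codes:
--             return "warning"
--
--     return "info"
-- ===== SOURCE B (Python) =====
-- def _classify_drift_severity(drift_codes):
--     blocking_codes = {"MHM-001", "MHM-002", "SHD-001", "SHD-002"}
--     warning_codes = {"MHM-003", "SHD-003"}
--     saw_warning = False
--     for code in drift_codes:
--         if code in blocking_codes:
--             return "blocking"
--         if code in warning_codes:
--             saw_warning = True
--     return "warning" if saw_warning else "info"
-- ===== Notes on version B (the rewrite author's own statement) =====
-- stated objective: simpler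
-- what changed: Replaced A's two sequential scans (one for blocking codes, then a second full scan for warning codes) with a single pass that returns 'blocking' immediately and tracks a saw_warning flag, deciding 'warning' vs 'info' after the loop.
import Mathlib
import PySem

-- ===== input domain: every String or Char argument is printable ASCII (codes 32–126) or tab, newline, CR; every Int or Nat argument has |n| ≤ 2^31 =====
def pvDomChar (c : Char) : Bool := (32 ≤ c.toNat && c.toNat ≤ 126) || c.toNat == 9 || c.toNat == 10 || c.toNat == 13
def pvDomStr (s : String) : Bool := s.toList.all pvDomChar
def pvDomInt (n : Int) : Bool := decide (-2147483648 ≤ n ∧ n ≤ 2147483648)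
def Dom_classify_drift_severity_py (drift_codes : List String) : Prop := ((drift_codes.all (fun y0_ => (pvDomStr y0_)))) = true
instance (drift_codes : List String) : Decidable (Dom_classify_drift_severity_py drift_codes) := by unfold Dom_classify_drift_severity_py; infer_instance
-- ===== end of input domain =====

-- B merges A's two sequential scans into one pass with a saw_warning flag (simpler, same O(n) cost).


-- ===== PORT A =====
-- Python sets of code literals; membership test `code in blocking_codes`
def pvBlockingCodes : List String := ["MHM-001", "MHM-002", "SHD-001", "SHD-002"]
def pvWarningCodes : List String := ["MHM-003", "SHD-003"]

-- first loop: return "blocking" on first blocking code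
def pvLoop1 : List String → Option String
  | [] => none
  | code :: rest => if pvBlockingCodes.contains code then some "blocking" else pvLoop1 rest

-- second loop: return "warning" on first warning code
def pvLoop2 : List String → Option String
  | [] => none
  | code :: rest => if pvWarningCodes.contains code then some "warning" else pvLoop2 rest

def classify_drift_severity_py (drift_codes : List String) : String :=
  match pvLoop1 drift_codes with
  | some s => s
  | none =>
    match pvLoop2 drift_codes with
    | some s => s
    | none => "info"

-- ===== PORT B =====
-- single pass carrying the saw_warning flag
def pvAltLoop : List String → Bool → String
  | [], sawWarning => if sawWarning then "warning" else "info"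
  | code :: rest, sawWarning =>
    if pvBlockingCodes.contains code then "blocking"
    else pvAltLoop rest (sawWarning || pvWarningCodes.contains code)

def classify_drift_severity_py_alt (drift_codes : List String) : String :=
  pvAltLoop drift_codes false

-- ===== PRECONDITION & SPEC =====
def Spec_classify_drift_severity_py (drift_codes : List String) (out : String) : Prop := out = classify_drift_severity_py_alt drift_codes
instance (drift_codes : List String) (out : String) : Decidable (Spec_classify_drift_severity_py drift_codes out) := by unfold Spec_classify_drift_severity_py; infer_instance

-- ===== CLAIM (what is proved, stated in full; the proofs are below) =====
def Claim_equal_classify_drift_severity_py : Prop := ∀ (drift_codes : List String), Dom_classify_drift_severity_py drift_codes → Spec_classify_drift_severity_py drift_codes (classify_drift_severity_py drift_codes)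

-- ===== LEMMAS AND PROOFS =====

-- ===== VERDICT (by name: the statement is the Claim_ definition above) =====
lemma pvLoop2_some {l : List String} {s : String} (h : pvLoop2 l = some s) : s = "warning" := by
  induction l with
  | nil => simp [pvLoop2] at h
  | cons c t ih =>
    simp only [pvLoop2] at h
    split at h
    · exact (Option.some_inj.mp h).symm
    · exact ih h

-- one-pass loop vs the two scans: the flag records whether a warning code was seen so far
lemma pvAltLoop_eq (l : List String) (saw : Bool) :
    pvAltLoop l saw =
      match pvLoop1 l with
      | some s => s
      | none => if saw || (pvLoop2 l).isSome then "warning" else "info" := by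
  induction l generalizing saw with
  | nil => simp [pvAltLoop, pvLoop1, pvLoop2]
  | cons c t ih =>
    simp only [pvAltLoop, pvLoop1, pvLoop2]
    by_cases hb : c ∈ pvBlockingCodes
    · simp [hb]
    · by_cases hw : c ∈ pvWarningCodes <;> simp [hb, hw, ih]

theorem classify_drift_severity_py_spec : Claim_equal_classify_drift_severity_py := by
  intro drift_codes _
  show classify_drift_severity_py drift_codes = classify_drift_severity_py_alt drift_codes
  rw [classify_drift_severity_py_alt, pvAltLoop_eq, classify_drift_severity_py]
  cases pvLoop1 drift_codes <;> cases h : pvLoop2 drift_codes <;> simp [h]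
  exact pvLoop2_some h
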